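-- pv_equiv track=rewrite | github.com/Gurjas2112/SEM-VI-SLIPS | slip9b.py | count_repeated_characters
-- ===== SOURCE A (Python) =====
-- def count_repeated_characters(string):
--     char_count = {}
--     for char in string:
--         if char in char_count:
--             char_count[char] += 1
--         else:
--             char_count[char] = 1
--
--     repeated_chars = {char: count for char, count in char_count.items() if count > 1}
--
--     repeated_chars_formatted = ", ".join([f"{char}-{count}" for char, count in repeated_chars.items()])
--
--     return repeated_chars_formatted
-- ===== SOURCE B (Python) =====
-- def count_repeated_characters(string):
--     def go(chars):
--         if not chars:
--             return []
--         head = chars[0]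
--         same = [c for c in chars if c == head]
--         rest = [c for c in chars if c != head]
--         entry = ["%s-%d" % (head, len(same))] if len(same) > 1 else []
--         return entry + go(rest)
--     return ", ".join(go(list(string)))
-- ===== Notes on version B (the rewrite author's own statement) =====
-- stated objective: alternative
-- what changed: Replaces the single-pass counting dict plus dict-comprehension filter with a recursive partition: repeatedly split off every occurrence of the head character, emit its entry if it repeats, and recurse on the remainder, so no dictionary is ever built.
import Mathlib
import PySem

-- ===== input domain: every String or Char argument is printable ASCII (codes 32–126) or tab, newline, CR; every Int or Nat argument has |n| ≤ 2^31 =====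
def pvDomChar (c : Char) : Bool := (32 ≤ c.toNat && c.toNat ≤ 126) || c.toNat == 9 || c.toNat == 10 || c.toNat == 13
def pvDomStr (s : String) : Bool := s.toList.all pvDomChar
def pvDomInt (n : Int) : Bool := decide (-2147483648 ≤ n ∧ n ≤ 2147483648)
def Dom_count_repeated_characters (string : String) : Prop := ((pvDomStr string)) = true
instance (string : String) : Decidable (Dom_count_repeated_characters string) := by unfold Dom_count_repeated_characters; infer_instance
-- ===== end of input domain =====

-- B replaces A's counting dict + filter by a recursive partition (split off all copies of
-- the head character, emit its entry if repeated, recurse on the rest); objective: alternative.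

-- ===== PORT A =====
def count_repeated_characters (string : String) : String :=
  let char_count : PySem.Dict Char Int :=
    string.toList.foldl
      (fun d char =>
        if d.contains char then d.insert char (d.getD char 0 + 1)
        else d.insert char 1)
      PySem.Dict.empty
  let repeated_chars : PySem.Dict Char Int :=
    PySem.Dict.ofList (char_count.items.filter (fun p => decide (1 < p.2)))
  PySem.Str.join ", "
    (repeated_chars.items.map (fun p => String.ofList [p.1] ++ "-" ++ PySem.Int.toStr p.2))

-- ===== PORT B =====
-- go(chars): partition on the head character and recurse on the remainder
def altGo : List Char → List String
  | [] => []
  | head :: tail =>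
    let same := (head :: tail).filter (fun c => c == head)
    let rest := (head :: tail).filter (fun c => !(c == head))
    (if 1 < same.length then
       [String.ofList [head] ++ "-" ++ PySem.Int.toStr (same.length : Int)]
     else []) ++ altGo rest
termination_by chars => chars.length
decreasing_by
  simp only [List.filter_cons, beq_self_eq_true, Bool.not_true, List.length_cons]
  exact Nat.lt_succ_of_le (List.length_filter_le _ _)

def count_repeated_characters_alt (string : String) : String :=
  PySem.Str.join ", " (altGo string.toList)

-- ===== PRECONDITION & SPEC =====
def Spec_count_repeated_characters (string : String) (out : String) : Prop := out = count_repeated_characters_alt string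
instance (string : String) (out : String) : Decidable (Spec_count_repeated_characters string out) := by unfold Spec_count_repeated_characters; infer_instance

-- ===== CLAIM (what is proved, stated in full; the proofs are below) =====
def Claim_equal_count_repeated_characters : Prop := ∀ (string : String), Dom_count_repeated_characters string → Spec_count_repeated_characters string (count_repeated_characters string)

-- ===== LEMMAS AND PROOFS =====

-- A's counting loop builds Counter(string)
lemma loop_eq_counter (cs : List Char) :
    cs.foldl
      (fun d char =>
        if d.contains char then d.insert char (d.getD char 0 + 1)
        else d.insert char 1)
      PySem.Dict.empty = PySem.Dict.counter cs := by
  rw [PySem.List.foldl_congr_mem cs _ (fun d x => d.insert x (d.getD x 0 + 1))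
        PySem.Dict.empty ?_]
  · exact PySem.Dict.foldl_insert_getD_add_one_eq_counter cs
  · intro d x _
    by_cases hc : d.contains x
    · simp [hc]
    · simp only [Bool.not_eq_true] at hc
      simp [hc, PySem.Dict.getD_of_not_contains d 0 hc]

-- A's output list is the filtered-and-formatted map over the distinct characters in first-occurrence order
lemma a_eq_map (cs : List Char) :
    (PySem.Dict.ofList ((PySem.Dict.counter cs).items.filter (fun p => decide ((1 : Int) < p.2)))).items.map
        (fun p => String.ofList [p.1] ++ "-" ++ PySem.Int.toStr p.2)
      = (((PySem.Set.ofList cs).filter (fun k => decide (1 < cs.count k))).map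
          (fun k => String.ofList [k] ++ "-" ++ PySem.Int.toStr (cs.count k))) := by
  simp only [PySem.Dict.items_counter, List.filter_map]
  rw [PySem.Dict.ofList, PySem.Dict.update,
      PySem.Dict.items_foldl_insert_fresh _ Prod.fst Prod.snd PySem.Dict.empty
        (fun a _ => PySem.Dict.contains_empty a.1) ?nodup]
  case nodup =>
    simpa [List.map_map, Function.comp_def] using
      ((PySem.Set.nodup_ofList cs).filter
        ((fun p : Char × Int => decide (1 < p.2)) ∘ fun k => (k, (cs.count k : Int))))
  simp [List.map_map, Function.comp_def, Nat.one_lt_cast,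
        show PySem.Dict.empty.items = ([] : List (Char × Int)) from rfl]

lemma ofList_append_singleton (l : List Char) (x : Char) :
    PySem.Set.ofList (l ++ [x]) = PySem.Set.add (PySem.Set.ofList l) x := by
  simp [PySem.Set.ofList_eq_foldl]

-- first-occurrence dedup commutes with filter
lemma ofList_filter (cs : List Char) (p : Char → Bool) :
    PySem.Set.ofList (cs.filter p) = (PySem.Set.ofList cs).filter p := by
  induction cs using List.reverseRecOn with
  | nil => rfl
  | append_singleton l x ih =>
    rw [List.filter_append, ofList_append_singleton]
    by_cases hx : p x
    · simp only [List.filter_cons, hx, if_true, List.filter_nil, ofList_append_singleton, ih]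
      unfold PySem.Set.add
      simp only [PySem.Set.contains, List.contains_eq_mem, List.mem_filter,
                 PySem.Set.mem_ofList, decide_eq_true_eq, hx, and_true]
      by_cases hm : x ∈ l
      · simp [hm]
      · simp [hm, List.filter_append, hx]
    · simp only [List.filter_cons, hx, if_false, List.filter_nil, List.append_nil, ih]
      unfold PySem.Set.add
      simp only [PySem.Set.contains, List.contains_eq_mem, PySem.Set.mem_ofList, decide_eq_true_eq]
      by_cases hm : x ∈ l
      · simp [hm, ih]
      · simp [hm, ih, List.filter_append, hx]

lemma contains_singleton (h y : Char) : PySem.Set.contains [h] y = (y == h) := by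
  rw [Bool.eq_iff_iff]; simp [PySem.Set.contains, List.contains_eq_mem]

-- peeling the head character off the first-occurrence dedup
lemma ofList_cons_filter (h : Char) (t : List Char) :
    PySem.Set.ofList (h :: t) = h :: PySem.Set.ofList (t.filter (fun c => !(c == h))) := by
  have h1 : PySem.Set.ofList (h :: t) = PySem.Set.update [h] t := by
    simp [PySem.Set.ofList_eq_foldl, PySem.Set.update]
  rw [h1, PySem.Set.update_eq_append_filter, ofList_filter]
  simp only [contains_singleton]
  rfl

-- B's recursion computes the same filtered-and-formatted map over the distinct characters
lemma altGo_eq (cs : List Char) :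
    altGo cs = ((PySem.Set.ofList cs).filter (fun k => decide (1 < cs.count k))).map
                 (fun k => String.ofList [k] ++ "-" ++ PySem.Int.toStr (cs.count k)) := by
  induction cs using altGo.induct with
  | case1 => simp [altGo]
  | case2 head tail rest ih =>
    have hrest : (head :: tail).filter (fun c => !(c == head)) = tail.filter (fun c => !(c == head)) := by
      simp
    simp only [rest, hrest] at ih
    rw [altGo, ofList_cons_filter, hrest]
    have hsame : ((head :: tail).filter (fun c => c == head)).length = (head :: tail).count head := by
      simp [List.count_eq_countP, List.countP_eq_length_filter]
    have hcnt : ∀ k ∈ PySem.Set.ofList (tail.filter (fun c => !(c == head))),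
        (tail.filter (fun c => !(c == head))).count k = (head :: tail).count k := by
      intro k hk
      rw [PySem.Set.mem_ofList, List.mem_filter] at hk
      obtain ⟨hkt, hkp⟩ := hk
      have hne : k ≠ head := by simpa using hkp
      rw [List.count_filter (by simpa using hne), List.count_cons_of_ne (Ne.symm hne)]
    rw [ih, hsame]
    have hfe : (PySem.Set.ofList (tail.filter (fun c => !(c == head)))).filter
                 (fun k => decide (1 < (tail.filter (fun c => !(c == head))).count k))
             = (PySem.Set.ofList (tail.filter (fun c => !(c == head)))).filter
                 (fun k => decide (1 < (head :: tail).count k)) := by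
      apply List.filter_congr; intro k hk; rw [hcnt k hk]
    have hme : ∀ k ∈ (PySem.Set.ofList (tail.filter (fun c => !(c == head)))).filter
                 (fun k => decide (1 < (head :: tail).count k)),
        String.ofList [k] ++ "-" ++ PySem.Int.toStr ((tail.filter (fun c => !(c == head))).count k)
          = String.ofList [k] ++ "-" ++ PySem.Int.toStr ((head :: tail).count k) := by
      intro k hk
      rw [hcnt k (List.mem_filter.mp hk).1]
    rw [hfe, List.map_congr_left hme]
    by_cases hlt : 1 < (head :: tail).count head
    · have hm : head ∈ tail := by
        rw [List.count_cons_self] at hlt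
        exact List.count_pos_iff.mp (by omega)
      simp [List.filter_cons, hlt, hm, List.count_cons_self]
    · have hm : head ∉ tail := by
        rw [List.count_cons_self] at hlt
        intro h
        exact hlt (by have := List.count_pos_iff.mpr h; omega)
      simp [List.filter_cons, hlt, hm, List.count_cons_self]

-- ===== VERDICT (by name: the statement is the Claim_ definition above) =====
theorem count_repeated_characters_spec : Claim_equal_count_repeated_characters := by
  intro string _
  unfold Spec_count_repeated_characters count_repeated_characters count_repeated_characters_alt
  simp only [loop_eq_counter, a_eq_map, altGo_eq]
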